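-- pv_equiv track=rewrite | github.com/Yael-Hari/hw1_094700 | data.py | filter_by_feature
-- ===== SOURCE A (Python) =====
-- def filter_by_feature(data, feature, values):
--     """
--     splits data to dicts with needed records and the rest in another dict
--     :param data: dict
--     :param feature: the feature by which to split the dict
--     :param values: set: containing the values of the feature by which to split the dict
--     :return: tuple: (data1, data2) data1 contains the records with the right values, and data2 the rest
--     """
--     data1 = dict()
--     data2 = dict()
--     for key in data.keys():
--         data1[key] = []
--         data2[key] = []
--     for i in range(len(data[feature])):
--         if (data[feature])[i] in values:
--             add_to_dict(data, data1, i)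
--         else:
--             add_to_dict(data, data2, i)
--     return data1, data2
--
-- def add_to_dict(main_dict, second_dict, i):
--     for key in main_dict.keys():
--         second_dict[key].append((main_dict[key])[i])
-- ===== SOURCE B (Python) =====
-- def filter_by_feature(data, feature, values):
--     """
--     splits data to dicts with needed records and the rest in another dict
--     (two-phase: build a selection mask over the feature column once,
--     then build each output column with one comprehension)
--     """
--     mask = [v in values for v in data[feature]]
--     data1 = {key: [x for x, m in zip(col, mask) if m] for key, col in data.items()}
--     data2 = {key: [x for x, m in zip(col, mask) if not m] for key, col in data.items()}
--     return data1, data2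
-- ===== Notes on version B (the rewrite author's own statement) =====
-- stated objective: simpler
-- what changed: A interleaves row-major appends into both output dicts via an add_to_dict helper; B precomputes a membership mask over the feature column once and then builds each output column with a single zip/filter comprehension, column by column.
import Mathlib
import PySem

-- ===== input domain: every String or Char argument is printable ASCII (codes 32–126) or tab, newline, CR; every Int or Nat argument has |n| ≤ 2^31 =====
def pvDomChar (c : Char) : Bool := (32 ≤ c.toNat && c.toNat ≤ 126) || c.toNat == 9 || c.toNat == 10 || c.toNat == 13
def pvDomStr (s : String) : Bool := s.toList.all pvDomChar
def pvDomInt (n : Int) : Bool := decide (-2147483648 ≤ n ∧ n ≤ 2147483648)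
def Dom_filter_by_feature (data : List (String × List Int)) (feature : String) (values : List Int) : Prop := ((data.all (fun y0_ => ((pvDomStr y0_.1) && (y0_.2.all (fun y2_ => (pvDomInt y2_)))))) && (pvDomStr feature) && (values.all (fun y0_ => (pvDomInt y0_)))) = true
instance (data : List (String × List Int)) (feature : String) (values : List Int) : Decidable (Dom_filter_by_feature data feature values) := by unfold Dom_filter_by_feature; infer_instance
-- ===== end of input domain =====

-- B replaces A's row-major interleaved appends (add_to_dict per row) with a precomputed
-- membership mask over the feature column and one zip/filter pass per column (objective: simpler).

-- ===== PORT A =====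
-- add_to_dict: for each key, append main_dict[key][i] to second_dict[key].
-- second_dict[key].append ports as Dict.modify with default [] (the default never fires:
-- the loop visits exactly the keys the caller initialised); main_dict[key][i] ports as
-- pyGetD with default 0 — the default is the IndexError case, excluded by Pre_.
def pvAddToDict (main : PySem.Dict String (List Int)) (second : PySem.Dict String (List Int)) (i : Int) : PySem.Dict String (List Int) :=
  main.keys.foldl (fun d key => d.modify key ([] : List Int) (fun s => s ++ [PySem.List.pyGetD (main.getD key []) i 0])) second

-- data[feature] ports as getD … []: the default is the KeyError case, excluded by Pre_.
def filter_by_feature (data : List (String × List Int)) (feature : String) (values : List Int) : (List (String × List Int)) × (List (String × List Int)) :=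
  let main : PySem.Dict String (List Int) := PySem.Dict.mk data
  let init : PySem.Dict String (List Int) × PySem.Dict String (List Int) :=
    main.keys.foldl (fun p key => (p.1.insert key [], p.2.insert key [])) (PySem.Dict.empty, PySem.Dict.empty)
  let res :=
    (PySem.List.pyRange 0 ((main.getD feature []).length : Int)).foldl
      (fun p i =>
        if values.contains (PySem.List.pyGetD (main.getD feature []) i 0) then
          (pvAddToDict main p.1 i, p.2)
        else
          (p.1, pvAddToDict main p.2 i))
      init
  (res.1.items, res.2.items)

-- ===== PORT B =====
def filter_by_feature_alt (data : List (String × List Int)) (feature : String) (values : List Int) : (List (String × List Int)) × (List (String × List Int)) :=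
  let mask : List Bool := ((PySem.Dict.mk data).getD feature []).map (fun v => values.contains v)
  let data1 := data.map (fun kv => (kv.1, ((kv.2.zip mask).filter (fun p => p.2)).map Prod.fst))
  let data2 := data.map (fun kv => (kv.1, ((kv.2.zip mask).filter (fun p => !p.2)).map Prod.fst))
  (data1, data2)

-- ===== PRECONDITION & SPEC =====
-- Pre_ excludes (a) association lists with duplicate keys, which represent no Python dict
-- (the argument is a dict in Python), (b) inputs where feature is not a key (A raises
-- KeyError), and (c) inputs where some column is shorter than the feature column
-- (A raises IndexError).
def Pre_filter_by_feature (data : List (String × List Int)) (feature : String) (values : List Int) : Prop :=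
  (data.map Prod.fst).Nodup ∧ feature ∈ data.map Prod.fst ∧
    ∀ kv ∈ data, ∀ cv ∈ data, cv.1 = feature → cv.2.length ≤ kv.2.length
instance (data : List (String × List Int)) (feature : String) (values : List Int) : Decidable (Pre_filter_by_feature data feature values) := by unfold Pre_filter_by_feature; infer_instance
def pvWitness_filter_by_feature : (List (String × List Int)) × String × List Int :=
  ([("a", [1, 2]), ("b", [10, 20])], "a", [2])
def Spec_filter_by_feature (data : List (String × List Int)) (feature : String) (values : List Int) (out : (List (String × List Int)) × (List (String × List Int))) : Prop := out = filter_by_feature_alt data feature values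
instance (data : List (String × List Int)) (feature : String) (values : List Int) (out : (List (String × List Int)) × (List (String × List Int))) : Decidable (Spec_filter_by_feature data feature values out) := by unfold Spec_filter_by_feature; infer_instance

-- ===== CLAIM (what is proved, stated in full; the proofs are below) =====
def Claim_equal_filter_by_feature : Prop := ∀ (data : List (String × List Int)) (feature : String) (values : List Int), Dom_filter_by_feature data feature values → Pre_filter_by_feature data feature values → Spec_filter_by_feature data feature values (filter_by_feature data feature values)

-- ===== LEMMAS AND PROOFS =====

-- the value B computes for one column: the elements of v whose mask bit is b
def pvSel (b : Bool) (v : List Int) (m : List Bool) : List Int :=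
  ((v.zip m).filter (fun p => p.2 == b)).map Prod.fst

lemma pvSel_nil (b : Bool) (v : List Int) : pvSel b v [] = [] := by
  simp [pvSel]

lemma pvSel_true (v : List Int) (m : List Bool) :
    pvSel true v m = ((v.zip m).filter (fun p => p.2)).map Prod.fst := by
  simp [pvSel]

lemma pvSel_false (v : List Int) (m : List Bool) :
    pvSel false v m = ((v.zip m).filter (fun p => !p.2)).map Prod.fst := by
  simp [pvSel]

-- one more mask bit appends (at most) one more element
lemma pvSel_take_succ (b : Bool) (v : List Int) (m : List Bool) (j : Nat)
    (hjm : j < m.length) (hjv : m.length ≤ v.length) :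
    pvSel b v (m.take (j + 1)) =
      pvSel b v (m.take j) ++ (if m.getD j false == b then [v.getD j 0] else []) := by
  have hjv' : j < v.length := lt_of_lt_of_le hjm hjv
  have hm : m.take (j+1) = m.take j ++ [m[j]] := by
    rw [List.take_add_one]; simp [List.getElem?_eq_getElem hjm]
  have hv : v = v.take j ++ v.drop j := (List.take_append_drop j v).symm
  have hz : v.zip (m.take (j+1)) = (v.take j).zip (m.take j) ++ [(v[j], m[j])] := by
    conv_lhs => rw [hm, hv]
    rw [List.zip_append (by simp [List.length_take]; omega)]
    rw [List.drop_eq_getElem_cons hjv']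
    rw [List.zip_cons_cons]
    simp
  have hz0 : v.zip (m.take j) = (v.take j).zip (m.take j) := by
    rw [List.zip_eq_zipWith, List.zipWith_eq_zipWith_take_min, ← List.zip_eq_zipWith]
    have h1 : (List.take j m).length = j := by simp; omega
    rw [h1]
    have h2 : min v.length j = j := by omega
    rw [h2, List.take_take]
    have h3 : min j j = j := by omega
    rw [h3]
  simp only [pvSel, hz, hz0, List.filter_append, List.map_append]
  congr 1
  rw [List.getD_eq_getElem m false hjm, List.getD_eq_getElem v 0 hjv']
  by_cases hb : m[j] == b <;> simp [hb]

-- a foldl of modify-append over distinct keys updates each entry pointwise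
lemma pvFoldModify (e : String → Int) (g : String × List Int → List Int) :
    ∀ (l pre : List (String × List Int)),
      (pre.map Prod.fst ++ l.map Prod.fst).Nodup →
      (l.map Prod.fst).foldl
          (fun d k => PySem.Dict.modify d k ([] : List Int) (fun s => s ++ [e k]))
          (PySem.Dict.mk (pre ++ l.map (fun kv => (kv.1, g kv))))
        = PySem.Dict.mk (pre ++ l.map (fun kv => (kv.1, g kv ++ [e kv.1]))) := by
  intro l
  induction l with
  | nil => intro pre _; simp
  | cons a l ih =>
    intro pre hnd
    have hdisj := List.disjoint_of_nodup_append hnd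
    have ha_pre : a.1 ∉ pre.map Prod.fst := fun h => hdisj h (by simp)
    have ha_l : a.1 ∉ l.map Prod.fst := by
      have := (List.Nodup.of_append_right hnd)
      rw [List.map_cons, List.nodup_cons] at this
      exact this.1
    have hget : (PySem.Dict.mk (pre ++ (a.1, g a) :: l.map (fun kv => (kv.1, g kv)))).getD a.1 [] = g a := by
      apply PySem.Dict.getD_of_mem_items
      · simp
      · show ((pre ++ (a.1, g a) :: l.map (fun kv => (kv.1, g kv))).map Prod.fst).Nodup
        simpa using hnd
    have hcont : (PySem.Dict.mk (pre ++ (a.1, g a) :: l.map (fun kv => (kv.1, g kv)))).contains a.1 = true := by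
      rw [PySem.Dict.contains_mk]; simp
    have hstep : PySem.Dict.modify (PySem.Dict.mk (pre ++ (a.1, g a) :: l.map (fun kv => (kv.1, g kv)))) a.1 ([] : List Int) (fun s => s ++ [e a.1])
        = PySem.Dict.mk ((pre ++ [(a.1, g a ++ [e a.1])]) ++ l.map (fun kv => (kv.1, g kv))) := by
      rw [PySem.Dict.modify, hget]
      apply PySem.Dict.ext
      rw [PySem.Dict.items_insert_of_contains _ _ hcont]
      show (pre ++ (a.1, g a) :: l.map (fun kv => (kv.1, g kv))).map
          (fun p => if (p.1 == a.1) = true then (a.1, g a ++ [e a.1]) else p) = _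
      rw [List.map_append, List.map_cons]
      show _ = (pre ++ [(a.1, g a ++ [e a.1])]) ++ l.map (fun kv => (kv.1, g kv))
      rw [List.append_assoc, List.singleton_append]
      congr 1
      · refine (List.map_congr_left ?_).trans (List.map_id pre)
        intro p hp
        have : p.1 ≠ a.1 := fun h => ha_pre (h ▸ List.mem_map_of_mem hp)
        simp [this]
      · congr 1
        · simp
        · rw [List.map_map]
          refine List.map_congr_left ?_
          intro kv hkv
          have : kv.1 ≠ a.1 := fun h => ha_l (h ▸ List.mem_map_of_mem hkv)
          simp [this]
    simp only [List.map_cons, List.foldl_cons]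
    show (l.map Prod.fst).foldl _ (PySem.Dict.modify (PySem.Dict.mk (pre ++ (a.1, g a) :: l.map (fun kv => (kv.1, g kv)))) a.1 ([] : List Int) (fun s => s ++ [e a.1])) = _
    rw [hstep]
    rw [ih (pre ++ [(a.1, g a ++ [e a.1])]) (by simpa using hnd)]
    simp

-- pvAddToDict on a state keyed like data appends main[key][i] to every column
lemma pvAddToDict_eq (data : List (String × List Int)) (hn : (data.map Prod.fst).Nodup)
    (g : String × List Int → List Int) (i : Int) :
    pvAddToDict (PySem.Dict.mk data) (PySem.Dict.mk (data.map (fun kv => (kv.1, g kv)))) i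
      = PySem.Dict.mk (data.map (fun kv => (kv.1, g kv ++ [PySem.List.pyGetD kv.2 i 0]))) := by
  have hkeys : (PySem.Dict.mk data).keys = data.map Prod.fst := by
    simp [PySem.Dict.keys]
  rw [pvAddToDict, hkeys]
  have h := pvFoldModify (fun k => PySem.List.pyGetD ((PySem.Dict.mk data).getD k []) i 0) g data [] (by simpa using hn)
  simp only [List.nil_append] at h
  rw [h]
  congr 1
  refine List.map_congr_left ?_
  intro kv hkv
  have : (PySem.Dict.mk data).getD kv.1 [] = kv.2 :=
    PySem.Dict.getD_of_mem_items _ (by simpa using hkv) (by simpa [PySem.Dict.keys] using hn) _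
  simp [this]

-- the init loop gives every key the empty column, in data's order
lemma pvInit_eq (data : List (String × List Int)) (hn : (data.map Prod.fst).Nodup) :
    (PySem.Dict.mk data).keys.foldl
        (fun (p : PySem.Dict String (List Int) × PySem.Dict String (List Int)) key =>
          (p.1.insert key [], p.2.insert key []))
        (PySem.Dict.empty, PySem.Dict.empty)
      = (PySem.Dict.mk (data.map (fun kv => (kv.1, ([] : List Int)))),
         PySem.Dict.mk (data.map (fun kv => (kv.1, ([] : List Int))))) := by
  rw [PySem.List.foldl_prod_mk (f := fun d key => PySem.Dict.insert d key ([] : List Int))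
      (g := fun d key => PySem.Dict.insert d key ([] : List Int))]
  have hkeys : (PySem.Dict.mk data).keys = data.map Prod.fst := by simp [PySem.Dict.keys]
  have h : ((data.map Prod.fst).foldl (fun d key => PySem.Dict.insert d key ([] : List Int)) PySem.Dict.empty)
      = PySem.Dict.mk (data.map (fun kv => (kv.1, ([] : List Int)))) := by
    apply PySem.Dict.ext
    rw [PySem.Dict.items_foldl_insert_fresh (data.map Prod.fst) (fun x => x) (fun _ => ([] : List Int)) _
        (by intro a _; exact PySem.Dict.contains_empty a) (by simpa using hn)]
    simp [List.map_map, Function.comp_def]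
    rfl
  rw [hkeys, h]

-- the main loop invariant: after the first j rows each dict holds the masked prefix of
-- every column
lemma pvLoop_inv (data : List (String × List Int)) (values : List Int)
    (hn : (data.map Prod.fst).Nodup) (col : List Int)
    (hlen : ∀ kv ∈ data, col.length ≤ kv.2.length) :
    ∀ j : Nat, j ≤ col.length →
      (PySem.List.pyRange 0 (j : Int)).foldl
          (fun (p : PySem.Dict String (List Int) × PySem.Dict String (List Int)) i =>
            if values.contains (PySem.List.pyGetD col i 0) then
              (pvAddToDict (PySem.Dict.mk data) p.1 i, p.2)
            else
              (p.1, pvAddToDict (PySem.Dict.mk data) p.2 i))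
          (PySem.Dict.mk (data.map (fun kv => (kv.1, ([] : List Int)))),
           PySem.Dict.mk (data.map (fun kv => (kv.1, ([] : List Int)))))
        = (PySem.Dict.mk (data.map (fun kv => (kv.1, pvSel true kv.2 ((col.map (fun v => values.contains v)).take j)))),
           PySem.Dict.mk (data.map (fun kv => (kv.1, pvSel false kv.2 ((col.map (fun v => values.contains v)).take j))))) := by
  intro j
  induction j with
  | zero => intro _; simp [pvSel_nil]
  | succ j ih =>
    intro hj
    have hjc : j < col.length := by omega
    have hcast : ((j + 1 : Nat) : Int) = (j : Int) + 1 := by push_cast; ring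
    rw [hcast, PySem.List.pyRange_one_succ_right (by positivity), List.foldl_append, List.foldl_cons, List.foldl_nil,
        ih (by omega)]
    have hget : PySem.List.pyGetD col (j : Int) 0 = col[j] := by
      rw [PySem.List.pyGetD_natCast, List.getD_eq_getElem col 0 hjc]
    have hmlen : (col.map (fun v => values.contains v)).length = col.length := by simp
    have hmj : (col.map (fun v => values.contains v)).getD j false = values.contains col[j] := by
      rw [List.getD_eq_getElem _ false (by simpa using hjc)]
      simp
    have entry : ∀ (b : Bool), ∀ kv ∈ data,
        pvSel b kv.2 ((col.map (fun v => values.contains v)).take (j + 1))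
          = pvSel b kv.2 ((col.map (fun v => values.contains v)).take j)
            ++ (if values.contains col[j] == b then [PySem.List.pyGetD kv.2 (j : Int) 0] else []) := by
      intro b kv hkv
      rw [pvSel_take_succ b kv.2 _ j (by simpa using hjc) (by simpa using hlen kv hkv), hmj]
      rw [PySem.List.pyGetD_natCast, List.getD_eq_getElem kv.2 0 (by have := hlen kv hkv; omega)]
    by_cases hc : values.contains col[j] = true
    · rw [hget]
      simp only [hc, if_true]
      rw [pvAddToDict_eq data hn (fun kv => pvSel true kv.2 ((col.map (fun v => values.contains v)).take j)) (j : Int)]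
      rw [Prod.mk.injEq]
      constructor
      · congr 1
        refine List.map_congr_left ?_
        intro kv hkv
        rw [entry true kv hkv, hc]
        simp
      · congr 1
        refine List.map_congr_left ?_
        intro kv hkv
        rw [entry false kv hkv, hc]
        simp
    · rw [hget]
      rw [Bool.not_eq_true] at hc
      simp only [hc, Bool.false_eq_true, if_false]
      rw [pvAddToDict_eq data hn (fun kv => pvSel false kv.2 ((col.map (fun v => values.contains v)).take j)) (j : Int)]
      rw [Prod.mk.injEq]
      constructor
      · congr 1
        refine List.map_congr_left ?_
        intro kv hkv
        rw [entry true kv hkv, hc]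
        simp
      · congr 1
        refine List.map_congr_left ?_
        intro kv hkv
        rw [entry false kv hkv, hc]
        simp

-- ===== VERDICT (by name: the statement is the Claim_ definition above) =====
theorem filter_by_feature_spec : Claim_equal_filter_by_feature := by
  intro data feature values _hdom hpre
  obtain ⟨hn, hfeat, hbound⟩ := hpre
  obtain ⟨kv, hkv, hkvf⟩ := List.mem_map.mp hfeat
  have hmem : (feature, kv.2) ∈ data := by
    rw [← hkvf]
    exact hkv
  have hcol : (PySem.Dict.mk data).getD feature [] = kv.2 :=
    PySem.Dict.getD_of_mem_items _ (by simpa using hmem) (by simpa [PySem.Dict.keys] using hn) _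
  have hlen : ∀ kv' ∈ data, kv.2.length ≤ kv'.2.length :=
    fun kv' h => hbound kv' h kv hkv hkvf
  have hmask : ((kv.2.map (fun v => values.contains v)).take kv.2.length)
      = kv.2.map (fun v => values.contains v) := by
    apply List.take_of_length_le
    simp
  show Spec_filter_by_feature data feature values (filter_by_feature data feature values)
  unfold Spec_filter_by_feature filter_by_feature filter_by_feature_alt
  simp only [hcol]
  rw [pvInit_eq data hn, pvLoop_inv data values hn kv.2 hlen kv.2.length (le_refl _), hmask]
  simp only [← pvSel_true, ← pvSel_false]
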